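-- pv_equiv track=rewrite | github.com/ransesBB/TareasBrenesMonge | Tarea 1/Tarea1.py | string_work
-- ===== SOURCE A (Python) =====
-- def string_work(texto):
--     # Se crean 2 listas como base de datos
--     # una con el abecedario en minusculas y otra en mayusculas
--     minuscula = ['a', 'b', 'c', 'd', 'e', 'f', 'g', 'h', 'i', 'j',
--                  'k', 'l', 'm', 'n', 'ñ', 'o', 'p', 'q', 'r', 's',
--                  't', 'u', 'v', 'w', 'x', 'y', 'z']
--     mayuscula = ['A', 'B', 'C', 'D', 'E', 'F', 'G', 'H', 'I', 'J',
--                  'K', 'L', 'M', 'N', 'Ñ', 'O', 'P', 'Q', 'R', 'S',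
--                  'T', 'U', 'V', 'W', 'X', 'Y', 'Z']
--     numeros = ['0', '1', '2', '3', '4', '5', '6', '7', '8', '9']
--
--     textolista = list(texto)
--     # pasa el texto del parametro de entrada a una lista de strings
--     tamaño = len(textolista)  # saber el tamaño de la lista anterior
--     flag = 0  # para saber si encontró la letras en las minusculas
--     flag1 = 0  # para saber si encontró la letras en las mayusculas
--
--     for cont in range(tamaño):  # recorre la lista del texto de entrada
--         flag = 0
--         flag2 = 0
--         for cont1 in range(27):  # recorre la lista de las minusculas
--             if textolista[cont] == minuscula[cont1]:
--                 # es para saber si la letra está en la lista de las minusculas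
--                 flag = 1
--                 break
--             else:
--                 flag1 = 0
--
--         if flag == 0:
--             for cont2 in range(27):  # recorre la lista de las mayusculas
--                 if textolista[cont] == mayuscula[cont2]:
--                     # es para saber si la letra está
--                     # en la lista de las mayusculas
--                     flag1 = 1
--                     break
--
--         if (flag1 == 0) and (flag == 0):
--             # si se da esta condición es porque el string no es letra
--             for cont3 in range(10):  # recorre la lista de los numeros
--                 if textolista[cont] == numeros[cont3]:
--                     # es para saber si el string está
--                     # en la lista de los numeros
--                     return "ERROR 404"  # Error porque contiene un  numero
--             if flag2 == 0:
--                 # si se cumple esta condicion es porque el string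
--                 # es un simbolo y no un numero
--                 return "ERROR 405"  # Error porque contiene un simbolo
--     resultadolist = []  # se crea lista donde se va a ir guardando el resultado
--     if (flag1 == 1) or (flag == 1):
--         # si se cumple esta condición es porque no hay ningun error
--         for cont5 in range(tamaño):  # recorre la lista del texto de entrada
--             flag3 = 0
--             for cont6 in range(27):
--                 if textolista[cont5] == minuscula[cont6]:
--                     resultadolist.append(mayuscula[cont6])
--                     flag3 = 1
--                     break
--             if flag3 == 0:
--                 for cont7 in range(27):
--                     if textolista[cont5] == mayuscula[cont7]:
--                         resultadolist.append(minuscula[cont7])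
--                         break
--     resultado = "".join(resultadolist)
--     # se transforma la lista donde se encuentra el resultado,
--     # en un string para su retorno
--     return resultado
-- ===== SOURCE B (Python) =====
-- _LOWER = "abcdefghijklmnñopqrstuvwxyz"
-- _UPPER = "ABCDEFGHIJKLMNÑOPQRSTUVWXYZ"
-- _DIGITS = "0123456789"
--
--
-- def string_work(texto):
--     out = []
--     for c in texto:
--         if c in _LOWER or c in _UPPER:
--             out.append(c.swapcase())
--         elif c in _DIGITS:
--             return "ERROR 404"
--         else:
--             return "ERROR 405"
--     return "".join(out)
-- ===== Notes on version B (the rewrite author's own statement) =====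
-- stated objective: simpler
-- what changed: A's two passes (a flag-threading validation loop with per-char scans over three alphabet lists, then a second paired-list scan building the swapped result) are collapsed into one pass that classifies each character by membership and appends its per-char swapcase immediately, returning the error on the first invalid character.
import Mathlib
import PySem

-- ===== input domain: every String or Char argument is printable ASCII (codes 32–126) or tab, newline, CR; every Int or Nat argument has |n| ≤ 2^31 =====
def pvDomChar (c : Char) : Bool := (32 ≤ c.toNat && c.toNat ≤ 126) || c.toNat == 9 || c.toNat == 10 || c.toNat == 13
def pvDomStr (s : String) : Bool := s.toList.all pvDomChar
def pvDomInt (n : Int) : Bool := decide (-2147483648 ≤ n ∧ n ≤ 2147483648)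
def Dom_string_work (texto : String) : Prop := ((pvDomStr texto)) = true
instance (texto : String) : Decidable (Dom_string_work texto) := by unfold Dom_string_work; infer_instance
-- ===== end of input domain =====

-- B replaces A's two separate passes (flag-based validation scan, then a second swap scan) by a
-- single pass that swaps each letter as it validates it; objective: simpler.

-- ===== PORT A =====
def pvMinuscula : List Char :=
  ['a','b','c','d','e','f','g','h','i','j','k','l','m','n','ñ','o','p','q','r','s','t','u','v','w','x','y','z']
def pvMayuscula : List Char :=
  ['A','B','C','D','E','F','G','H','I','J','K','L','M','N','Ñ','O','P','Q','R','S','T','U','V','W','X','Y','Z']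
def pvNumeros : List Char := ['0','1','2','3','4','5','6','7','8','9']

-- inner loop over minuscula: break with flag=1 on match, else flag1 := 0 on each non-match;
-- returns (flag, flag1 after the loop)
def pvScanLower (c : Char) : List Char → Int → Int × Int
  | [], f1 => (0, f1)
  | h :: t, f1 => if c = h then (1, f1) else pvScanLower c t 0

-- inner loop over mayuscula: break with flag1=1 on match, else flag1 unchanged
def pvScanUpper (c : Char) : List Char → Int → Int
  | [], f1 => f1
  | h :: t, f1 => if c = h then 1 else pvScanUpper c t f1

-- inner loop over numeros: 'return "ERROR 404"' on match
def pvIsNum (c : Char) : List Char → Bool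
  | [] => false
  | h :: t => if c = h then true else pvIsNum c t

-- A's first for-loop: threads flag1 across iterations; .inl = early return of an error,
-- .inr = the final (flag, flag1)
def pvLoop1 : List Char → Int → Int → Sum String (Int × Int)
  | [], f, f1 => .inr (f, f1)
  | c :: t, _f, f1 =>
    let p := pvScanLower c pvMinuscula f1
    let f := p.1
    let f1b := if f = 0 then pvScanUpper c pvMayuscula p.2 else p.2
    if f1b = 0 ∧ f = 0 then
      if pvIsNum c pvNumeros then .inl "ERROR 404" else .inl "ERROR 405"
    else pvLoop1 t f f1b

-- paired scan of the two alphabet lists used by A's second loop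
def pvFindSwap (c : Char) : List Char → List Char → Option Char
  | h :: t, r :: rt => if c = h then some r else pvFindSwap c t rt
  | _, _ => none

-- A's second for-loop, building resultadolist
def pvSwapAll : List Char → List Char
  | [] => []
  | c :: t =>
    match pvFindSwap c pvMinuscula pvMayuscula with
    | some r => r :: pvSwapAll t
    | none =>
      match pvFindSwap c pvMayuscula pvMinuscula with
      | some r => r :: pvSwapAll t
      | none => pvSwapAll t

def string_work (texto : String) : String :=
  let l := texto.toList
  match pvLoop1 l 0 0 with
  | .inl e => e
  | .inr (f, f1) =>
    String.mk (if f1 = 1 ∨ f = 1 then pvSwapAll l else [])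

-- ===== PORT B =====
def pvLower : List Char := "abcdefghijklmnñopqrstuvwxyz".toList
def pvUpper : List Char := "ABCDEFGHIJKLMNÑOPQRSTUVWXYZ".toList
def pvDigits : List Char := "0123456789".toList

-- c.swapcase() for one char: exact on ASCII letters and 'ñ'/'Ñ', the only chars B applies it to
def pvSwapcase (c : Char) : Char :=
  if ('a' ≤ c ∧ c ≤ 'z') ∨ c = 'ñ' then Char.ofNat (c.toNat - 32)
  else if ('A' ≤ c ∧ c ≤ 'Z') ∨ c = 'Ñ' then Char.ofNat (c.toNat + 32)
  else c

def pvGo : List Char → List Char → String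
  | [], out => String.mk out.reverse
  | c :: t, out =>
    if c ∈ pvLower ∨ c ∈ pvUpper then pvGo t (pvSwapcase c :: out)
    else if c ∈ pvDigits then "ERROR 404" else "ERROR 405"

def string_work_alt (texto : String) : String := pvGo texto.toList []

-- ===== PRECONDITION & SPEC =====
def Spec_string_work (texto : String) (out : String) : Prop := out = string_work_alt texto
instance (texto : String) (out : String) : Decidable (Spec_string_work texto out) := by unfold Spec_string_work; infer_instance

-- ===== CLAIM (what is proved, stated in full; the proofs are below) =====
def Claim_equal_string_work : Prop := ∀ (texto : String), Dom_string_work texto → Spec_string_work texto (string_work texto)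

-- ===== LEMMAS AND PROOFS =====

theorem pvScanLower_fst (c : Char) (l : List Char) (f1 : Int) :
    (pvScanLower c l f1).1 = if c ∈ l then 1 else 0 := by
  induction l generalizing f1 with
  | nil => simp [pvScanLower]
  | cons h t ih =>
    by_cases hc : c = h <;> simp [pvScanLower, hc, ih]

theorem pvScanLower_not_mem (c : Char) (f1 : Int) (h : c ∉ pvMinuscula) :
    pvScanLower c pvMinuscula f1 = (0, 0) := by
  have key : ∀ (l : List Char) (g1 : Int), c ∉ l → pvScanLower c l g1 = (0, if l = [] then g1 else 0) := by
    intro l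
    induction l with
    | nil => intro g1 _; simp [pvScanLower]
    | cons a t ih =>
      intro g1 hm
      simp only [List.mem_cons, not_or] at hm
      simp [pvScanLower, hm.1, ih 0 hm.2]
  rw [key pvMinuscula f1 h]
  simp [pvMinuscula]

theorem pvScanUpper_char (c : Char) (l : List Char) (f1 : Int) :
    pvScanUpper c l f1 = if c ∈ l then 1 else f1 := by
  induction l with
  | nil => simp [pvScanUpper]
  | cons h t ih =>
    by_cases hc : c = h <;> simp [pvScanUpper, hc, ih]

theorem pvIsNum_char (c : Char) (l : List Char) :
    pvIsNum c l = decide (c ∈ l) := by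
  induction l with
  | nil => simp [pvIsNum]
  | cons h t ih =>
    by_cases hc : c = h <;> simp [pvIsNum, hc, ih]

theorem pvFindSwap_not_mem (c : Char) (l r : List Char) (h : c ∉ l) :
    pvFindSwap c l r = none := by
  induction l generalizing r with
  | nil => cases r <;> simp [pvFindSwap]
  | cons a t ih =>
    simp only [List.mem_cons, not_or] at h
    cases r with
    | nil => simp [pvFindSwap]
    | cons b rt => simp [pvFindSwap, h.1, ih rt h.2]

theorem pvLower_eq : pvLower = pvMinuscula := by decide
theorem pvUpper_eq : pvUpper = pvMayuscula := by decide
theorem pvDigits_eq : pvDigits = pvNumeros := by decide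

theorem pvFindSwap_min : ∀ c ∈ pvMinuscula, pvFindSwap c pvMinuscula pvMayuscula = some (pvSwapcase c) :=
  (List.map_inj_left (f := fun c => pvFindSwap c pvMinuscula pvMayuscula)
    (g := fun c => some (pvSwapcase c)) (l := pvMinuscula)).mp (by decide)

theorem pvFindSwap_may : ∀ c ∈ pvMayuscula, pvFindSwap c pvMayuscula pvMinuscula = some (pvSwapcase c) :=
  (List.map_inj_left (f := fun c => pvFindSwap c pvMayuscula pvMinuscula)
    (g := fun c => some (pvSwapcase c)) (l := pvMayuscula)).mp (by decide)

-- one iteration of A's first loop, by the class of the character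
theorem pvStep_lower (c : Char) (t : List Char) (f f1 : Int) (hlo : c ∈ pvMinuscula) :
    pvLoop1 (c :: t) f f1 = pvLoop1 t 1 ((pvScanLower c pvMinuscula f1).2) := by
  have hfst := pvScanLower_fst c pvMinuscula f1
  rw [if_pos hlo] at hfst
  simp [pvLoop1, hfst]

theorem pvStep_upper (c : Char) (t : List Char) (f f1 : Int)
    (hlo : c ∉ pvMinuscula) (hhi : c ∈ pvMayuscula) :
    pvLoop1 (c :: t) f f1 = pvLoop1 t 0 1 := by
  have hsl := pvScanLower_not_mem c f1 hlo
  have hsu := pvScanUpper_char c pvMayuscula 0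
  rw [if_pos hhi] at hsu
  simp [pvLoop1, hsl, hsu]

theorem pvStep_other (c : Char) (t : List Char) (f f1 : Int)
    (hlo : c ∉ pvMinuscula) (hhi : c ∉ pvMayuscula) :
    pvLoop1 (c :: t) f f1 =
      (if c ∈ pvNumeros then .inl "ERROR 404" else .inl "ERROR 405") := by
  have hsl := pvScanLower_not_mem c f1 hlo
  have hsu := pvScanUpper_char c pvMayuscula 0
  rw [if_neg hhi] at hsu
  simp [pvLoop1, hsl, hsu, pvIsNum_char]

theorem pvMain (l : List Char) : ∀ (acc : List Char) (f f1 : Int),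
    pvGo l acc =
      match pvLoop1 l f f1 with
      | .inl e => e
      | .inr _ => String.mk (acc.reverse ++ pvSwapAll l) := by
  induction l with
  | nil => intro acc f f1; simp [pvGo, pvLoop1, pvSwapAll]
  | cons c t ih =>
    intro acc f f1
    by_cases hlo : c ∈ pvMinuscula
    · rw [pvStep_lower c t f f1 hlo]
      have hswap := pvFindSwap_min c hlo
      simp only [pvGo, pvLower_eq, pvUpper_eq, pvSwapAll, hswap, hlo, true_or, if_true]
      rw [ih (pvSwapcase c :: acc) 1 ((pvScanLower c pvMinuscula f1).2)]
      rcases pvLoop1 t 1 ((pvScanLower c pvMinuscula f1).2) with e | p <;> simp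
    · by_cases hhi : c ∈ pvMayuscula
      · rw [pvStep_upper c t f f1 hlo hhi]
        have hswapn := pvFindSwap_not_mem c pvMinuscula pvMayuscula hlo
        have hswap := pvFindSwap_may c hhi
        simp only [pvGo, pvLower_eq, pvUpper_eq, pvSwapAll, hswapn, hswap, hlo, hhi, or_true, if_true]
        rw [ih (pvSwapcase c :: acc) 0 1]
        rcases pvLoop1 t 0 1 with e | p <;> simp
      · rw [pvStep_other c t f f1 hlo hhi]
        by_cases hd : c ∈ pvNumeros
        · simp [pvGo, pvLower_eq, pvUpper_eq, pvDigits_eq, hlo, hhi, hd]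
        · simp [pvGo, pvLower_eq, pvUpper_eq, pvDigits_eq, hlo, hhi, hd]

-- after a nonempty first loop that did not error, one of the two flags is 1
theorem pvLoop1_flags (l : List Char) : ∀ (f f1 f' f1' : Int), l ≠ [] →
    pvLoop1 l f f1 = .inr (f', f1') → f' = 1 ∨ f1' = 1 := by
  induction l with
  | nil => intro _ _ _ _ hne _; exact absurd rfl hne
  | cons c t ih =>
    intro f f1 f' f1' _ h
    by_cases hlo : c ∈ pvMinuscula
    · rw [pvStep_lower c t f f1 hlo] at h
      rcases t with _ | ⟨d, t'⟩
      · simp [pvLoop1] at h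
        omega
      · exact ih _ _ _ _ (by simp) h
    · by_cases hhi : c ∈ pvMayuscula
      · rw [pvStep_upper c t f f1 hlo hhi] at h
        rcases t with _ | ⟨d, t'⟩
        · simp [pvLoop1] at h
          omega
        · exact ih _ _ _ _ (by simp) h
      · rw [pvStep_other c t f f1 hlo hhi] at h
        split at h <;> injection h

-- ===== VERDICT (by name: the statement is the Claim_ definition above) =====
theorem string_work_spec : Claim_equal_string_work := by
  intro texto _
  unfold Spec_string_work
  have hB : string_work_alt texto =
      (match pvLoop1 texto.toList 0 0 with
        | .inl e => e
        | .inr _ => String.mk (pvSwapAll texto.toList)) := by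
    unfold string_work_alt
    rw [pvMain texto.toList [] 0 0]
    rcases pvLoop1 texto.toList 0 0 with e | p
    · rfl
    · simp
  rw [hB]
  unfold string_work
  rcases hl : pvLoop1 texto.toList 0 0 with e | ⟨f, f1⟩
  · simp [hl]
  · simp only [hl]
    rcases ht : texto.toList with _ | ⟨c, t⟩
    · simp [pvSwapAll]
    · have hflags := pvLoop1_flags texto.toList 0 0 f f1 (by rw [ht]; simp) hl
      rcases hflags with h1 | h1 <;> simp [h1]
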